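-- pv_equiv track=rewrite | github.com/ADuong12/ADAPT | backend/services/source_editor.py | _split_text_for_lengths
-- ===== SOURCE A (Python) =====
-- def _split_text_for_lengths(text: str, lengths: list[int]) -> list[str]:
--     if not lengths:
--         return []
--     parts: list[str] = []
--     pos = 0
--     for i, length in enumerate(lengths):
--         if i == len(lengths) - 1:
--             parts.append(text[pos:])
--         else:
--             parts.append(text[pos : pos + length])
--             pos += length
--     return parts
-- ===== SOURCE B (Python) =====
-- def _split_text_for_lengths(text: str, lengths: list[int]) -> list[str]:
--     if not lengths:
--         return []
--     bounds = [0]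
--     for length in lengths[:-1]:
--         bounds.append(bounds[-1] + length)
--     ends = bounds[1:] + [None]
--     return [text[a:b] for a, b in zip(bounds, ends)]
-- ===== Notes on version B (the rewrite author's own statement) =====
-- stated objective: alternative
-- what changed: B precomputes the full boundary table (prefix sums plus a None sentinel for the open-ended last slice) and then produces all parts in one pairwise-zip slicing comprehension, instead of A's single loop that carries a running position and branches on the last index to take the rest.
import Mathlib
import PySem

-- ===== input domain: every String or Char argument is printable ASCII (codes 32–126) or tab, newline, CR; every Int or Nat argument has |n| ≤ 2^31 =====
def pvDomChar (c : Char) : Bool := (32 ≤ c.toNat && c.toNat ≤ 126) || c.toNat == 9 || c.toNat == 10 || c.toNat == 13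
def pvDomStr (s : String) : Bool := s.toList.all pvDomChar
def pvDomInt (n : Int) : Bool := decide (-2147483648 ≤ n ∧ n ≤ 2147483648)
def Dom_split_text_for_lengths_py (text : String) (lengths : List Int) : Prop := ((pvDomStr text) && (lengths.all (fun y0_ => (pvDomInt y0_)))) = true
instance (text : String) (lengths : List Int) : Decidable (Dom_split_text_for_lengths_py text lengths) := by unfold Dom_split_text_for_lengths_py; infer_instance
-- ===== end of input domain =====

-- B builds the boundary table (prefix sums plus a None sentinel for the open-ended last slice)
-- and emits all parts by one pairwise zip-and-slice pass, instead of A's running-position loop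
-- that branches on the last index; same cost, alternative decomposition.

-- ===== PORT A =====
def split_text_for_lengths_py (text : String) (lengths : List Int) : List String :=
  if lengths = [] then []
  else
    ((PySem.List.enumerate lengths 0).foldl
      (fun (st : List String × Int) (il : Int × Int) =>
        if il.1 = (lengths.length : Int) - 1 then
          (st.1 ++ [PySem.Str.slice text (some st.2) none], st.2)
        else
          (st.1 ++ [PySem.Str.slice text (some st.2) (some (st.2 + il.2))], st.2 + il.2))
      ([], 0)).1

-- ===== PORT B =====
def split_text_for_lengths_py_alt (text : String) (lengths : List Int) : List String :=
  if lengths = [] then []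
  else
    let bounds := lengths.dropLast.foldl (fun bs length => bs ++ [bs.getLast! + length]) [(0 : Int)]
    let ends := (bounds.drop 1).map some ++ [none]
    (bounds.zip ends).map (fun ab => PySem.Str.slice text (some ab.1) ab.2)

-- ===== PRECONDITION & SPEC =====
def Spec_split_text_for_lengths_py (text : String) (lengths : List Int) (out : List String) : Prop := out = split_text_for_lengths_py_alt text lengths
instance (text : String) (lengths : List Int) (out : List String) : Decidable (Spec_split_text_for_lengths_py text lengths out) := by unfold Spec_split_text_for_lengths_py; infer_instance

-- ===== CLAIM (what is proved, stated in full; the proofs are below) =====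
def Claim_equal_split_text_for_lengths_py : Prop := ∀ (text : String) (lengths : List Int), Dom_split_text_for_lengths_py text lengths → Spec_split_text_for_lengths_py text lengths (split_text_for_lengths_py text lengths)

-- ===== LEMMAS AND PROOFS =====

-- common reference form: the parts of `text` starting at absolute position p for `ls`
def pvGo (text : String) (p : Int) : List Int → List String
  | [] => []
  | [_] => [PySem.Str.slice text (some p) none]
  | l :: l' :: t => PySem.Str.slice text (some p) (some (p + l)) :: pvGo text (p + l) (l' :: t)

-- reference boundary scan
def pvBounds (p : Int) : List Int → List Int
  | [] => [p]
  | l :: t => p :: pvBounds (p + l) t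

theorem pvA_loop (text : String) (N : Int) (ls : List Int) :
    ∀ (s : Int) (pos : Int) (acc : List String), ls ≠ [] → s + (ls.length : Int) = N →
    ((PySem.List.enumerate ls s).foldl
      (fun (st : List String × Int) (il : Int × Int) =>
        if il.1 = N - 1 then
          (st.1 ++ [PySem.Str.slice text (some st.2) none], st.2)
        else
          (st.1 ++ [PySem.Str.slice text (some st.2) (some (st.2 + il.2))], st.2 + il.2))
      (acc, pos)).1 = acc ++ pvGo text pos ls := by
  induction ls with
  | nil => intro _ _ _ h; exact absurd rfl h
  | cons l t ih =>
    intro s pos acc _ hN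
    cases t with
    | nil =>
      have hs : s = N - 1 := by simp at hN; omega
      simp [PySem.List.enumerate_cons, PySem.List.enumerate_nil, pvGo, hs]
    | cons l' t' =>
      have hs : ¬ (s = N - 1) := by simp at hN; omega
      rw [PySem.List.enumerate_cons]
      simp only [List.foldl_cons, hs, if_false]
      rw [ih (s + 1) (pos + l) (acc ++ [PySem.Str.slice text (some pos) (some (pos + l))])
          (by simp) (by simp at hN ⊢; omega)]
      simp [pvGo]

theorem pvB_bounds (ls : List Int) :
    ∀ (p : Int) (acc : List Int),
    ls.foldl (fun bs length => bs ++ [bs.getLast! + length]) (acc ++ [p]) = acc ++ pvBounds p ls := by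
  induction ls with
  | nil => intro p acc; simp [pvBounds]
  | cons l t ih =>
    intro p acc
    simp only [List.foldl_cons]
    have hlast : (acc ++ [p]).getLast! = p := by simp
    rw [hlast, show acc ++ [p] ++ [p + l] = (acc ++ [p]) ++ [p + l] by simp,
        ih (p + l) (acc ++ [p])]
    simp [pvBounds]

theorem pvB_zip (text : String) (ls : List Int) :
    ∀ (p : Int), ls ≠ [] →
    (((pvBounds p ls.dropLast).zip (((pvBounds p ls.dropLast).drop 1).map some ++ [none])).map
      (fun ab => PySem.Str.slice text (some ab.1) ab.2)) = pvGo text p ls := by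
  induction ls with
  | nil => intro _ h; exact absurd rfl h
  | cons l t ih =>
    intro p _
    cases t with
    | nil => simp [pvBounds, pvGo]
    | cons l' t' =>
      have hcons : ∃ r, pvBounds (p + l) (l' :: t').dropLast = (p + l) :: r := by
        cases t' with
        | nil => exact ⟨[], rfl⟩
        | cons a b => exact ⟨_, rfl⟩
      obtain ⟨r, hr⟩ := hcons
      have := ih (p + l) (by simp)
      simp only [List.dropLast_cons_of_ne_nil (by simp : l' :: t' ≠ [])] at this ⊢
      simp only [pvBounds, hr] at this ⊢
      simp only [List.drop_one, List.tail_cons, List.map_cons, List.zip_cons_cons,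
        List.map_cons, pvGo, List.cons_append] at this ⊢
      rw [this]

-- ===== VERDICT (by name: the statement is the Claim_ definition above) =====
theorem split_text_for_lengths_py_spec : Claim_equal_split_text_for_lengths_py := by
  intro text lengths _
  unfold Spec_split_text_for_lengths_py split_text_for_lengths_py split_text_for_lengths_py_alt
  by_cases h : lengths = []
  · simp [h]
  · simp only [h, if_false]
    rw [pvA_loop text (lengths.length : Int) lengths 0 0 [] h (by simp)]
    rw [show ([(0 : Int)] : List Int) = [] ++ [(0 : Int)] by simp, pvB_bounds]
    simp only [List.nil_append]
    rw [pvB_zip text lengths 0 h]
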